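-- pv_equiv track=rewrite | github.com/oskare952-lab/Histolauncher-linux | src/core/java/installer.py | suggest_java_feature_version
-- ===== SOURCE A (Python) =====
-- from typing import Any, Final, TypedDict
--
-- JAVA_INSTALLABLE_FEATURE_VERSIONS: Final[tuple[int, ...]] = (8, 11, 16, 17, 21, 25)
--
-- def suggest_java_feature_version(required_major: int) -> int:
--     try:
--         required = int(required_major or 0)
--     except (TypeError, ValueError):
--         required = 0
--
--     if required <= 0:
--         return 21
--     for version in JAVA_INSTALLABLE_FEATURE_VERSIONS:
--         if version >= required:
--             return version
--     return required
-- ===== SOURCE B (Python) =====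
-- from typing import Any, Final, TypedDict
--
-- JAVA_INSTALLABLE_FEATURE_VERSIONS: Final[tuple[int, ...]] = (8, 11, 16, 17, 21, 25)
--
-- def suggest_java_feature_version(required_major: int) -> int:
--     if required_major <= 0:
--         return 21
--     # bisect_left binary search instead of a linear scan
--     lo, hi = 0, len(JAVA_INSTALLABLE_FEATURE_VERSIONS)
--     while lo < hi:
--         mid = (lo + hi) // 2
--         if JAVA_INSTALLABLE_FEATURE_VERSIONS[mid] < required_major:
--             lo = mid + 1
--         else:
--             hi = mid
--     if lo < len(JAVA_INSTALLABLE_FEATURE_VERSIONS):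
--         return JAVA_INSTALLABLE_FEATURE_VERSIONS[lo]
--     return required_major
-- ===== Notes on version B (the rewrite author's own statement) =====
-- stated objective: alternative
-- what changed: Drops the redundant int()/or-0 prologue (identity on ints) and replaces the linear first->= scan over the version tuple with a hand-written bisect_left binary search plus an in-bounds index check.
import Mathlib
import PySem

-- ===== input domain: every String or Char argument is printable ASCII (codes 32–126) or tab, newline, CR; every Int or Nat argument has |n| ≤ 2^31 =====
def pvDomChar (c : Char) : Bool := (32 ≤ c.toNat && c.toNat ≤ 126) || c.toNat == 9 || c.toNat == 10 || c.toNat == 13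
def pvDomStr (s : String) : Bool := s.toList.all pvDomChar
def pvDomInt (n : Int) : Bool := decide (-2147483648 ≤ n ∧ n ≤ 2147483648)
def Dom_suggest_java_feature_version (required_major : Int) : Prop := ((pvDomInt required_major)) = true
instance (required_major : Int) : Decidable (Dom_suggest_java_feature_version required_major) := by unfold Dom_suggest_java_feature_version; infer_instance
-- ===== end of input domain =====

-- B: bisect_left binary search over the constant version tuple instead of A's linear first->= scan (return value equivalence).
-- ===== PORT A =====
def pvVersions : List Int := [8, 11, 16, 17, 21, 25]

-- the for-loop of A: first version >= required, else none
def pvScanA : List Int → Int → Option Int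
  | [], _ => none
  | v :: rest, req => if v ≥ req then some v else pvScanA rest req

def suggest_java_feature_version (required_major : Int) : Int :=
  -- int(required_major or 0): identity on ints (0 stays 0); never raises for int input
  let required : Int := if required_major ≠ 0 then required_major else 0
  if required ≤ 0 then 21
  else match pvScanA pvVersions required with
    | some v => v
    | none => required

-- ===== PORT B =====
-- hand-written bisect_left while-loop from Source B
-- the while-loop, with fuel = hi - lo (each iteration strictly shrinks the interval)
def pvBisectLeftGo (xs : List Int) (x : Int) : Nat → Nat → Nat → Nat
  | 0, lo, _ => lo
  | fuel + 1, lo, hi =>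
    if lo < hi then
      let mid := (lo + hi) / 2
      if xs.getD mid 0 < x then pvBisectLeftGo xs x fuel (mid + 1) hi
      else pvBisectLeftGo xs x fuel lo mid
    else lo

def pvBisectLeft (xs : List Int) (x : Int) (lo hi : Nat) : Nat :=
  pvBisectLeftGo xs x (hi - lo) lo hi

def suggest_java_feature_version_alt (required_major : Int) : Int :=
  if required_major ≤ 0 then 21
  else
    let i := pvBisectLeft pvVersions required_major 0 pvVersions.length
    if i < pvVersions.length then pvVersions.getD i 0
    else required_major

-- ===== PRECONDITION & SPEC =====
def Spec_suggest_java_feature_version (required_major : Int) (out : Int) : Prop := out = suggest_java_feature_version_alt required_major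
instance (required_major : Int) (out : Int) : Decidable (Spec_suggest_java_feature_version required_major out) := by unfold Spec_suggest_java_feature_version; infer_instance

-- ===== CLAIM (what is proved, stated in full; the proofs are below) =====
def Claim_equal_suggest_java_feature_version : Prop := ∀ (required_major : Int), Dom_suggest_java_feature_version required_major → Spec_suggest_java_feature_version required_major (suggest_java_feature_version required_major)

-- ===== LEMMAS AND PROOFS =====

-- evaluation of the binary search at each (lo, hi) pair it can reach
theorem go_ii (xs : List Int) (x : Int) (f i : Nat) : pvBisectLeftGo xs x f i i = i := by
  cases f <;> simp [pvBisectLeftGo]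

theorem g45 (x : Int) : pvBisectLeftGo pvVersions x 4 4 5 = if 21 < x then 5 else 4 := by
  rw [pvBisectLeftGo]
  norm_num [go_ii, show pvVersions.getD 4 0 = 21 from rfl, show pvVersions[4]?.getD 0 = (21:Int) from rfl]

theorem g46 (x : Int) : pvBisectLeftGo pvVersions x 5 4 6 =
    if 25 < x then 6 else if 21 < x then 5 else 4 := by
  rw [pvBisectLeftGo]
  norm_num [go_ii, g45, show pvVersions.getD 5 0 = 25 from rfl, show pvVersions[5]?.getD 0 = (25:Int) from rfl]

theorem g01 (x : Int) : pvBisectLeftGo pvVersions x 4 0 1 = if 8 < x then 1 else 0 := by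
  rw [pvBisectLeftGo]
  norm_num [go_ii, show pvVersions.getD 0 0 = 8 from rfl, show pvVersions[0]?.getD 0 = (8:Int) from rfl]

theorem g23 (x : Int) : pvBisectLeftGo pvVersions x 4 2 3 = if 16 < x then 3 else 2 := by
  rw [pvBisectLeftGo]
  norm_num [go_ii, show pvVersions.getD 2 0 = 16 from rfl, show pvVersions[2]?.getD 0 = (16:Int) from rfl]

theorem g03 (x : Int) : pvBisectLeftGo pvVersions x 5 0 3 =
    if 11 < x then (if 16 < x then 3 else 2) else if 8 < x then 1 else 0 := by
  rw [pvBisectLeftGo]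
  norm_num [g01, g23, show pvVersions.getD 1 0 = 11 from rfl, show pvVersions[1]?.getD 0 = (11:Int) from rfl]

theorem bl06 (x : Int) : pvBisectLeft pvVersions x 0 6 =
    if 17 < x then (if 25 < x then 6 else if 21 < x then 5 else 4)
    else if 11 < x then (if 16 < x then 3 else 2) else if 8 < x then 1 else 0 := by
  rw [pvBisectLeft, pvBisectLeftGo]
  norm_num [g46, g03, show pvVersions.getD 3 0 = 17 from rfl, show pvVersions[3]?.getD 0 = (17:Int) from rfl]

-- evaluation of A's linear scan
theorem scan_eval (x : Int) : pvScanA pvVersions x =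
    if x ≤ 8 then some 8 else if x ≤ 11 then some 11 else if x ≤ 16 then some 16
    else if x ≤ 17 then some 17 else if x ≤ 21 then some 21 else if x ≤ 25 then some 25
    else none := by
  simp only [pvVersions, pvScanA, ge_iff_le]

-- ===== VERDICT (by name: the statement is the Claim_ definition above) =====
theorem suggest_java_feature_version_spec : Claim_equal_suggest_java_feature_version := by
  intro r _
  unfold Spec_suggest_java_feature_version suggest_java_feature_version
    suggest_java_feature_version_alt
  have hreq : (if r ≠ 0 then r else 0) = r := by split_ifs <;> omega
  simp only [hreq, scan_eval, bl06, show pvVersions.length = 6 from rfl]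
  split_ifs <;> norm_num [pvVersions, List.getD] <;> omega
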